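-- pv_equiv track=rewrite | github.com/h4wwk3ye/code | Hackerearth/Data structures/Binary Tree/monk_and_tree.py | check_parent
-- ===== SOURCE A (Python) =====
-- def check_parent(array_2d, array_parent, child_index, parent_index):
--     if array_2d[child_index][parent_index] == True:
--         return True
--     if array_parent[child_index] == -1:
--         return None
--     if parent_index == array_parent[child_index]:
--         return True
--     return check_parent(array_2d, array_parent, array_parent[child_index], parent_index)
-- ===== SOURCE B (Python) =====
-- def check_parent(array_2d, array_parent, child_index, parent_index):
--     c = child_index
--     while True:
--         if array_2d[c][parent_index] == True:
--             return True
--         p = array_parent[c]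
--         if p == -1:
--             return None
--         if p == parent_index:
--             return True
--         c = p
-- ===== Notes on version B (the rewrite author's own statement) =====
-- stated objective: idiomatic
-- what changed: Replaces the tail recursion by an explicit iterative while-loop over the parent chain (same guards in the same order), avoiding Python's recursion depth limit on deep chains.
import Mathlib
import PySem

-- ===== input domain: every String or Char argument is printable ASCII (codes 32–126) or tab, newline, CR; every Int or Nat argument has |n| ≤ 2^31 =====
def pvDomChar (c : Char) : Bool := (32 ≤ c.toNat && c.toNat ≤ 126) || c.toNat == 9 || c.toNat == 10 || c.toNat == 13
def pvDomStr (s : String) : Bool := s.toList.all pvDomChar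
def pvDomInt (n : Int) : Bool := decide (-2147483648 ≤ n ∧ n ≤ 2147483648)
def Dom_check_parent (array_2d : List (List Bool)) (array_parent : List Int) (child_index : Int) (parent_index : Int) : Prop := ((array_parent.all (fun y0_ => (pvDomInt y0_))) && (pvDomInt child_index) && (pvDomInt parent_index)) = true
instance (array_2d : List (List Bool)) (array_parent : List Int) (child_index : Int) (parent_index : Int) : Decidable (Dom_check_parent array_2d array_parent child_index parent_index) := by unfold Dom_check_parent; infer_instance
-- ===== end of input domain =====

-- B replaces A's tail recursion by an explicit iterative while-loop over the same parent chain
-- (same guards in the same order); equivalence is proved on every input admitted by Pre_.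

-- ===== PORT A =====
-- A's tail recursion.  The fuel argument only totalises it in Lean: a terminating Python run
-- visits pairwise-distinct chain positions (the walk is deterministic), hence takes at most
-- array_parent.length recursive steps, which the fuel supplied below covers; fuel exhaustion
-- corresponds to a diverging Python run.  Where Python raises IndexError the port returns
-- none / falls through (nothing is claimed there: such inputs are outside Pre_).
def check_parent_go (fuel : Nat) (array_2d : List (List Bool)) (array_parent : List Int) (child_index : Int) (parent_index : Int) : Option Bool :=
  match fuel with
  | 0 => none
  | fuel + 1 =>
    match PySem.List.pyGet? array_2d child_index with
    | none => none  -- IndexError in Python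
    | some row =>
      if PySem.List.pyGet? row parent_index = some true then some true
      else
        match PySem.List.pyGet? array_parent child_index with
        | none => none  -- IndexError in Python
        | some p =>
          if p = -1 then none
          else if parent_index = p then some true
          else check_parent_go fuel array_2d array_parent p parent_index

def check_parent (array_2d : List (List Bool)) (array_parent : List Int) (child_index : Int) (parent_index : Int) : Option Bool :=
  check_parent_go (array_parent.length + 1) array_2d array_parent child_index parent_index

-- ===== PORT B =====
-- One execution of B's loop body: either the loop returns (.inr result) or reassigns c (.inl p).
def check_parent_alt_step (array_2d : List (List Bool)) (array_parent : List Int) (parent_index : Int) (c : Int) : Sum Int (Option Bool) :=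
  match PySem.List.pyGet? array_2d c with
  | none => Sum.inr none  -- IndexError in Python
  | some row =>
    if PySem.List.pyGet? row parent_index = some true then Sum.inr (some true)
    else
      match PySem.List.pyGet? array_parent c with
      | none => Sum.inr none  -- IndexError in Python
      | some p =>
        if p = -1 then Sum.inr none
        else if p = parent_index then Sum.inr (some true)
        else Sum.inl p

-- The 'while True' driver (fuel only totalises it, as for port A).
def check_parent_alt_loop (fuel : Nat) (array_2d : List (List Bool)) (array_parent : List Int) (parent_index : Int) (c : Int) : Option Bool :=
  match fuel with
  | 0 => none
  | fuel + 1 =>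
    match check_parent_alt_step array_2d array_parent parent_index c with
    | Sum.inr r => r
    | Sum.inl p => check_parent_alt_loop fuel array_2d array_parent parent_index p

def check_parent_alt (array_2d : List (List Bool)) (array_parent : List Int) (child_index : Int) (parent_index : Int) : Option Bool :=
  check_parent_alt_loop (array_parent.length + 1) array_2d array_parent parent_index child_index

-- ===== PRECONDITION & SPEC =====
-- Helpers for Pre_ (input-side description of the parent-chain walk; they never compute an output):
-- pvWalkCont gives the next chain position when no guard of A fires and no lookup is out of range;
-- pvWalkDecides says a guard fires at c (A returns there); pvWalkChain is the k-th chain position.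
def pvWalkCont (a2 : List (List Bool)) (ap : List Int) (pi c : Int) : Option Int :=
  match PySem.List.pyGet? a2 c with
  | none => none
  | some row =>
    match PySem.List.pyGet? row pi with
    | some false =>
      match PySem.List.pyGet? ap c with
      | some p => if p = -1 ∨ p = pi then none else some p
      | none => none
    | _ => none

def pvWalkDecides (a2 : List (List Bool)) (ap : List Int) (pi c : Int) : Bool :=
  match PySem.List.pyGet? a2 c with
  | none => false
  | some row =>
    match PySem.List.pyGet? row pi with
    | some true => true
    | some false =>
      match PySem.List.pyGet? ap c with
      | some p => decide (p = -1 ∨ p = pi)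
      | none => false
    | none => false

def pvWalkChain (a2 : List (List Bool)) (ap : List Int) (pi c : Int) : Nat → Option Int
  | 0 => some c
  | k + 1 => (pvWalkChain a2 ap pi c k).bind (pvWalkCont a2 ap pi)

-- Pre_ admits exactly the inputs on which the parent-chain walk terminates with a guard firing,
-- every index encountered in range — i.e. where Python A returns a value; a terminating run
-- visits pairwise-distinct positions, so array_parent.length steps always suffice.  (A walk
-- deeper than the interpreter's recursion limit, possible only when array_parent has on the
-- order of a thousand entries arranged as one long chain, would make Python A raise
-- RecursionError where the iterative B still returns; no closed-form bound can state the
-- interpreter-dependent limit exactly, so Pre_ does not attempt to carve those out.)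
def Pre_check_parent (array_2d : List (List Bool)) (array_parent : List Int) (child_index : Int) (parent_index : Int) : Prop :=
  ((List.range (array_parent.length + 1)).any (fun k =>
    match pvWalkChain array_2d array_parent parent_index child_index k with
    | some c => pvWalkDecides array_2d array_parent parent_index c
    | none => false)) = true
instance (array_2d : List (List Bool)) (array_parent : List Int) (child_index : Int) (parent_index : Int) : Decidable (Pre_check_parent array_2d array_parent child_index parent_index) := by unfold Pre_check_parent; infer_instance

def pvWitness_check_parent : List (List Bool) × List Int × Int × Int := ([[false, true], [false, false]], [-1, 0], 1, 1)

def Spec_check_parent (array_2d : List (List Bool)) (array_parent : List Int) (child_index : Int) (parent_index : Int) (out : Option Bool) : Prop := out = check_parent_alt array_2d array_parent child_index parent_index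
instance (array_2d : List (List Bool)) (array_parent : List Int) (child_index : Int) (parent_index : Int) (out : Option Bool) : Decidable (Spec_check_parent array_2d array_parent child_index parent_index out) := by unfold Spec_check_parent; infer_instance

-- ===== CLAIM (what is proved, stated in full; the proofs are below) =====
def Claim_equal_check_parent : Prop := ∀ (array_2d : List (List Bool)) (array_parent : List Int) (child_index : Int) (parent_index : Int), Dom_check_parent array_2d array_parent child_index parent_index → Pre_check_parent array_2d array_parent child_index parent_index → Spec_check_parent array_2d array_parent child_index parent_index (check_parent array_2d array_parent child_index parent_index)

-- ===== LEMMAS AND PROOFS =====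

-- The two ports are equal for every fuel and every input (both return none when the fuel runs
-- out or a lookup fails, and step through the same guards otherwise); the claim restricts this
-- to Pre_, where the ports moreover agree with their Pythons.
theorem go_eq_loop (a2 : List (List Bool)) (ap : List Int) (pi : Int) :
    ∀ (fuel : Nat) (c : Int),
      check_parent_go fuel a2 ap c pi = check_parent_alt_loop fuel a2 ap pi c := by
  intro fuel
  induction fuel with
  | zero => intro c; rfl
  | succ f ih =>
    intro c
    simp only [check_parent_go, check_parent_alt_loop, check_parent_alt_step]
    cases hr : PySem.List.pyGet? a2 c with
    | none => rfl
    | some row =>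
      by_cases hb : PySem.List.pyGet? row pi = some true
      · simp [hb]
      · cases hp : PySem.List.pyGet? ap c with
        | none => simp [hb]
        | some p =>
          by_cases h1 : p = -1
          · simp [hb, h1]
          · by_cases h2 : pi = p
            · simp [h1, h2]
            · have h2' : ¬ p = pi := fun h => h2 h.symm
              simp [hb, h1, h2, h2', ih]

-- ===== VERDICT (by name: the statement is the Claim_ definition above) =====
theorem check_parent_spec : Claim_equal_check_parent := by
  intro a2 ap ci pi _ _
  show check_parent a2 ap ci pi = check_parent_alt a2 ap ci pi
  unfold check_parent check_parent_alt
  exact go_eq_loop a2 ap pi (ap.length + 1) ci
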